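-- pv_equiv track=rewrite | github.com/akanksha86/governance-metadata-propagation | dataplex_integration/lineage_propagation.py | describe_sql_logic
-- ===== SOURCE A (Python) =====
-- from typing import List, Dict, Any, Optional
--
-- def describe_sql_logic(expr: Optional[str]) -> str:
--     """Converts SQL expression into natural language hint."""
--     if not expr: return ""
--
--     expr_upper = expr.upper()
--
--     # 1. Type Conversion
--     if "CAST(" in expr_upper or "SAFE_CAST(" in expr_upper:
--         return f", converted to a different format (`{expr}`)"
--
--     # 2. Null Handling
--     if any(kw in expr_upper for kw in ["COALESCE(", "IFNULL(", "NULLIF("]):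
--         return f", with null-handling logic (`{expr}`)"
--
--     # 3. Numerical Operations
--     if any(kw in expr_upper for kw in ["ROUND(", "CEIL(", "FLOOR(", "TRUNC("]):
--         return f", rounded using `{expr}`"
--
--     if any(op in expr for op in ["*", "/", "+", "-"]) and any(char.isdigit() for char in expr):
--         return f", with value adjustment applied (calculated as `{expr}`)"
--
--     # 4. String Formatting
--     if any(kw in expr_upper for kw in ["UPPER(", "LOWER(", "TRIM(", "CONCAT(", "SUBSTR("]):
--         return f", with string transformations (`{expr}`)"
--
--     # 5. Date/Time Extractions
--     if "EXTRACT(" in expr_upper: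
--         return f", with temporal component extracted via `{expr}`"
--
--     # 6. Logical Branching
--     if "CASE" in expr_upper or "IF(" in expr_upper:
--         return f", determined by conditional logic (`{expr}`)"
--
--     # 7. Safe Execution
--     if "SAFE." in expr_upper:
--         return f", executed with safe-mode operations (`{expr}`)"
--
--     return f", calculated using: `{expr}`"
-- ===== SOURCE B (Python) =====
-- from typing import Optional
--
-- # Flat keyword -> category-priority table (priorities 0..7; 8 = default).
-- _KEYWORDS = [
--     ("CAST(", 0), ("SAFE_CAST(", 0),
--     ("COALESCE(", 1), ("IFNULL(", 1), ("NULLIF(", 1),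
--     ("ROUND(", 2), ("CEIL(", 2), ("FLOOR(", 2), ("TRUNC(", 2),
--     ("UPPER(", 4), ("LOWER(", 4), ("TRIM(", 4), ("CONCAT(", 4), ("SUBSTR(", 4),
--     ("EXTRACT(", 5),
--     ("CASE", 6), ("IF(", 6),
--     ("SAFE.", 7),
-- ]
--
-- _TEMPLATES = [
--     (", converted to a different format (`", "`)"),
--     (", with null-handling logic (`", "`)"),
--     (", rounded using `", "`"),
--     (", with value adjustment applied (calculated as `", "`)"),
--     (", with string transformations (`", "`)"),
--     (", with temporal component extracted via `", "`"),
--     (", determined by conditional logic (`", "`)"),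
--     (", executed with safe-mode operations (`", "`)"),
--     (", calculated using: `", "`"),
-- ]
--
-- def describe_sql_logic(expr: Optional[str]) -> str:
--     """Converts SQL expression into natural language hint."""
--     if not expr:
--         return ""
--     u = expr.upper()
--     # exhaustively collect every matching category, then pick the best priority
--     cats = [cat for kw, cat in _KEYWORDS if kw in u]
--     if any(op in expr for op in "*/+-") and any(c.isdigit() for c in expr):
--         cats.append(3)
--     best = min(cats, default=8)
--     pre, post = _TEMPLATES[best]
--     return pre + expr + post
-- ===== Notes on version B (the rewrite author's own statement) =====
-- stated objective: alternative
-- what changed: A short-circuits through a fixed if/return chain, returning at the first matching category; B instead exhaustively collects every matching category from a flat keyword->priority table plus the arithmetic rule, then formats with the minimum-priority template (first-match control flow replaced by collect-all + min over a priority index).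
import Mathlib
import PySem

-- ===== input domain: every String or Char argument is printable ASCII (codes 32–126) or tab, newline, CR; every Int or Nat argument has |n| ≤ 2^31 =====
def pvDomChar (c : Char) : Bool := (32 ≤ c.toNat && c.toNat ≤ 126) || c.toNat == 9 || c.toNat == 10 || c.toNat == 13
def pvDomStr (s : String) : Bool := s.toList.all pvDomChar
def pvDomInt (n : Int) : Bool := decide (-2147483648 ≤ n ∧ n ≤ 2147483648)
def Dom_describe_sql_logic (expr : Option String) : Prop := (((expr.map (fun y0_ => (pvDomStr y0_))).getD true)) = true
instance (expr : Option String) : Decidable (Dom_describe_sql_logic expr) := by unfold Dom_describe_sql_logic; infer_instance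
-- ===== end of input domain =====

-- B replaces A's short-circuiting if/return chain by exhaustive matching: it collects
-- EVERY matching category from a flat keyword->priority table and formats with the
-- minimum-priority template (objective: alternative; same cost).

-- char.isdigit() for a single char — exact on the ASCII domain
def pvIsDigitChar (c : Char) : Bool := '0' ≤ c && c ≤ '9'

-- ===== PORT A =====
def describe_sql_logic (expr : Option String) : String :=
  match expr with
  | none => ""
  | some e =>
    if e = "" then ""
    else
      let u := PySem.Str.upper e
      if PySem.Str.isIn "CAST(" u || PySem.Str.isIn "SAFE_CAST(" u then
        ", converted to a different format (`" ++ e ++ "`)"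
      else if ["COALESCE(", "IFNULL(", "NULLIF("].any (fun kw => PySem.Str.isIn kw u) then
        ", with null-handling logic (`" ++ e ++ "`)"
      else if ["ROUND(", "CEIL(", "FLOOR(", "TRUNC("].any (fun kw => PySem.Str.isIn kw u) then
        ", rounded using `" ++ e ++ "`"
      else if (["*", "/", "+", "-"].any (fun op => PySem.Str.isIn op e))
              && (e.toList.any pvIsDigitChar) then
        ", with value adjustment applied (calculated as `" ++ e ++ "`)"
      else if ["UPPER(", "LOWER(", "TRIM(", "CONCAT(", "SUBSTR("].any (fun kw => PySem.Str.isIn kw u) then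
        ", with string transformations (`" ++ e ++ "`)"
      else if PySem.Str.isIn "EXTRACT(" u then
        ", with temporal component extracted via `" ++ e ++ "`"
      else if PySem.Str.isIn "CASE" u || PySem.Str.isIn "IF(" u then
        ", determined by conditional logic (`" ++ e ++ "`)"
      else if PySem.Str.isIn "SAFE." u then
        ", executed with safe-mode operations (`" ++ e ++ "`)"
      else
        ", calculated using: `" ++ e ++ "`"

-- ===== PORT B =====
-- flat keyword -> category-priority table
def pvKeywords : List (String × Nat) :=
  [ ("CAST(", 0), ("SAFE_CAST(", 0),
    ("COALESCE(", 1), ("IFNULL(", 1), ("NULLIF(", 1),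
    ("ROUND(", 2), ("CEIL(", 2), ("FLOOR(", 2), ("TRUNC(", 2),
    ("UPPER(", 4), ("LOWER(", 4), ("TRIM(", 4), ("CONCAT(", 4), ("SUBSTR(", 4),
    ("EXTRACT(", 5),
    ("CASE", 6), ("IF(", 6),
    ("SAFE.", 7) ]

def pvTemplates : List (String × String) :=
  [ (", converted to a different format (`", "`)"),
    (", with null-handling logic (`", "`)"),
    (", rounded using `", "`"),
    (", with value adjustment applied (calculated as `", "`)"),
    (", with string transformations (`", "`)"),
    (", with temporal component extracted via `", "`"),
    (", determined by conditional logic (`", "`)"),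
    (", executed with safe-mode operations (`", "`)"),
    (", calculated using: `", "`") ]

-- the list comprehension + the arithmetic append of Source B
def pvCats (e u : String) : List Nat :=
  let cats0 := pvKeywords.filterMap (fun p => if PySem.Str.isIn p.1 u then some p.2 else none)
  if ("*/+-".toList.any (fun o => PySem.Chars.isIn [o] e.toList))
      && (e.toList.any pvIsDigitChar) then cats0 ++ [3] else cats0

def describe_sql_logic_alt (expr : Option String) : String :=
  match expr with
  | none => ""
  | some e =>
    if e = "" then ""
    else
      let u := PySem.Str.upper e
      let cats := pvCats e u
      let best := match PySem.List.min? cats (fun x => x) with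
        | some m => m
        | none => 8
      -- _TEMPLATES[best]: best is always 0..8, so the index is in range
      let t := (PySem.List.pyGet? pvTemplates (best : Int)).getD ("", "")
      t.1 ++ e ++ t.2

-- ===== PRECONDITION & SPEC =====
def Spec_describe_sql_logic (expr : Option String) (out : String) : Prop := out = describe_sql_logic_alt expr
instance (expr : Option String) (out : String) : Decidable (Spec_describe_sql_logic expr out) := by unfold Spec_describe_sql_logic; infer_instance

-- ===== CLAIM =====
def Claim_equal_describe_sql_logic : Prop := ∀ (expr : Option String), Dom_describe_sql_logic expr → Spec_describe_sql_logic expr (describe_sql_logic expr)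

-- ===== LEMMAS AND PROOFS =====

set_option maxHeartbeats 1000000 in
lemma mem_pvKw (u : String) (x : Nat) :
    x ∈ pvKeywords.filterMap (fun p => if PySem.Str.isIn p.1 u then some p.2 else none) ↔
      (x = 0 ∧ (PySem.Str.isIn "CAST(" u = true ∨ PySem.Str.isIn "SAFE_CAST(" u = true)) ∨
      (x = 1 ∧ (PySem.Str.isIn "COALESCE(" u = true ∨ PySem.Str.isIn "IFNULL(" u = true ∨ PySem.Str.isIn "NULLIF(" u = true)) ∨
      (x = 2 ∧ (PySem.Str.isIn "ROUND(" u = true ∨ PySem.Str.isIn "CEIL(" u = true ∨ PySem.Str.isIn "FLOOR(" u = true ∨ PySem.Str.isIn "TRUNC(" u = true)) ∨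
      (x = 4 ∧ (PySem.Str.isIn "UPPER(" u = true ∨ PySem.Str.isIn "LOWER(" u = true ∨ PySem.Str.isIn "TRIM(" u = true ∨ PySem.Str.isIn "CONCAT(" u = true ∨ PySem.Str.isIn "SUBSTR(" u = true)) ∨
      (x = 5 ∧ PySem.Str.isIn "EXTRACT(" u = true) ∨
      (x = 6 ∧ (PySem.Str.isIn "CASE" u = true ∨ PySem.Str.isIn "IF(" u = true)) ∨
      (x = 7 ∧ PySem.Str.isIn "SAFE." u = true) := by
  constructor
  · rw [List.mem_filterMap]
    rintro ⟨p, hp, hfx⟩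
    simp only [pvKeywords, List.mem_cons, List.not_mem_nil, or_false] at hp
    rcases hp with rfl|rfl|rfl|rfl|rfl|rfl|rfl|rfl|rfl|rfl|rfl|rfl|rfl|rfl|rfl|rfl|rfl|rfl <;>
      (simp only [Option.ite_none_right_eq_some, Option.some.injEq] at hfx
       obtain ⟨hin, rfl⟩ := hfx)
    · exact Or.inl (⟨rfl, Or.inl (hin)⟩)
    · exact Or.inl (⟨rfl, Or.inr (hin)⟩)
    · exact Or.inr (Or.inl (⟨rfl, Or.inl (hin)⟩))
    · exact Or.inr (Or.inl (⟨rfl, Or.inr (Or.inl (hin))⟩))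
    · exact Or.inr (Or.inl (⟨rfl, Or.inr (Or.inr (hin))⟩))
    · exact Or.inr (Or.inr (Or.inl (⟨rfl, Or.inl (hin)⟩)))
    · exact Or.inr (Or.inr (Or.inl (⟨rfl, Or.inr (Or.inl (hin))⟩)))
    · exact Or.inr (Or.inr (Or.inl (⟨rfl, Or.inr (Or.inr (Or.inl (hin)))⟩)))
    · exact Or.inr (Or.inr (Or.inl (⟨rfl, Or.inr (Or.inr (Or.inr (hin)))⟩)))
    · exact Or.inr (Or.inr (Or.inr (Or.inl (⟨rfl, Or.inl (hin)⟩))))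
    · exact Or.inr (Or.inr (Or.inr (Or.inl (⟨rfl, Or.inr (Or.inl (hin))⟩))))
    · exact Or.inr (Or.inr (Or.inr (Or.inl (⟨rfl, Or.inr (Or.inr (Or.inl (hin)))⟩))))
    · exact Or.inr (Or.inr (Or.inr (Or.inl (⟨rfl, Or.inr (Or.inr (Or.inr (Or.inl (hin))))⟩))))
    · exact Or.inr (Or.inr (Or.inr (Or.inl (⟨rfl, Or.inr (Or.inr (Or.inr (Or.inr (hin))))⟩))))
    · exact Or.inr (Or.inr (Or.inr (Or.inr (Or.inl (⟨rfl, hin⟩)))))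
    · exact Or.inr (Or.inr (Or.inr (Or.inr (Or.inr (Or.inl (⟨rfl, Or.inl (hin)⟩))))))
    · exact Or.inr (Or.inr (Or.inr (Or.inr (Or.inr (Or.inl (⟨rfl, Or.inr (hin)⟩))))))
    · exact Or.inr (Or.inr (Or.inr (Or.inr (Or.inr (Or.inr (⟨rfl, hin⟩))))))
  · intro h
    rw [List.mem_filterMap]
    rcases h with ⟨rfl, h|h⟩ | ⟨rfl, h|h|h⟩ | ⟨rfl, h|h|h|h⟩ | ⟨rfl, h|h|h|h|h⟩ | ⟨rfl, h⟩ | ⟨rfl, h|h⟩ | ⟨rfl, h⟩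
    · exact ⟨("CAST(", 0), by simp [pvKeywords], by rw [if_pos h]⟩
    · exact ⟨("SAFE_CAST(", 0), by simp [pvKeywords], by rw [if_pos h]⟩
    · exact ⟨("COALESCE(", 1), by simp [pvKeywords], by rw [if_pos h]⟩
    · exact ⟨("IFNULL(", 1), by simp [pvKeywords], by rw [if_pos h]⟩
    · exact ⟨("NULLIF(", 1), by simp [pvKeywords], by rw [if_pos h]⟩
    · exact ⟨("ROUND(", 2), by simp [pvKeywords], by rw [if_pos h]⟩
    · exact ⟨("CEIL(", 2), by simp [pvKeywords], by rw [if_pos h]⟩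
    · exact ⟨("FLOOR(", 2), by simp [pvKeywords], by rw [if_pos h]⟩
    · exact ⟨("TRUNC(", 2), by simp [pvKeywords], by rw [if_pos h]⟩
    · exact ⟨("UPPER(", 4), by simp [pvKeywords], by rw [if_pos h]⟩
    · exact ⟨("LOWER(", 4), by simp [pvKeywords], by rw [if_pos h]⟩
    · exact ⟨("TRIM(", 4), by simp [pvKeywords], by rw [if_pos h]⟩
    · exact ⟨("CONCAT(", 4), by simp [pvKeywords], by rw [if_pos h]⟩
    · exact ⟨("SUBSTR(", 4), by simp [pvKeywords], by rw [if_pos h]⟩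
    · exact ⟨("EXTRACT(", 5), by simp [pvKeywords], by rw [if_pos h]⟩
    · exact ⟨("CASE", 6), by simp [pvKeywords], by rw [if_pos h]⟩
    · exact ⟨("IF(", 6), by simp [pvKeywords], by rw [if_pos h]⟩
    · exact ⟨("SAFE.", 7), by simp [pvKeywords], by rw [if_pos h]⟩


set_option maxHeartbeats 1000000 in
lemma mem_pvCats (e u : String) (x : Nat) :
    x ∈ pvCats e u ↔
      (x ∈ pvKeywords.filterMap (fun p => if PySem.Str.isIn p.1 u then some p.2 else none)) ∨
      (x = 3 ∧ (("*/+-".toList.any (fun o => PySem.Chars.isIn [o] e.toList))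
              && (e.toList.any pvIsDigitChar)) = true) := by
  unfold pvCats
  split
  · next harith =>
    simp only [List.mem_append, List.mem_singleton, harith, and_true]
  · next harith =>
    rw [Bool.not_eq_true] at harith
    simp only [harith, Bool.false_eq_true, and_false, or_false]

-- min? with identity key is pinned down by a member that is a lower bound
lemma pv_min?_id_eq (L : List Nat) (i : Nat) (hi : i ∈ L) (hlb : ∀ y ∈ L, i ≤ y) :
    PySem.List.min? L (fun x => x) = some i := by
  cases h : PySem.List.min? L (fun x => x) with
  | none =>
    rw [PySem.List.min?_eq_none_iff] at h
    subst h; cases hi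
  | some m =>
    have hm : m ∈ L := PySem.List.min?_mem h
    have h1 : i ≤ m := hlb m hm
    have h2 : m ≤ i := by exact_mod_cast PySem.List.min?_isMin h i hi
    congr 1; omega

-- min? is none when no category matches
lemma pv_min?_eq_none (L : List Nat) (h : ∀ y, y ∉ L) :
    PySem.List.min? L (fun x => x) = none := by
  rw [PySem.List.min?_eq_none_iff]
  cases L with
  | nil => rfl
  | cons a t => exact absurd List.mem_cons_self (h a)

-- A's arithmetic condition (scan over one-char strings) equals B's (scan over the chars of "*/+-")
lemma pv_arith_eq (e : String) :
    ((["*", "/", "+", "-"].any (fun op => PySem.Str.isIn op e)) && (e.toList.any pvIsDigitChar))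
      = (("*/+-".toList.any (fun o => PySem.Chars.isIn [o] e.toList)) && (e.toList.any pvIsDigitChar)) := by
  simp [PySem.Str.isIn]

-- B on a nonempty string, once min? of the category list is known
lemma alt_eq_of_min (e : String) (he : ¬ e = "") (o : Option Nat)
    (h : PySem.List.min? (pvCats e (PySem.Str.upper e)) (fun x => x) = o) :
    describe_sql_logic_alt (some e)
      = (((PySem.List.pyGet? pvTemplates ((match o with | some m => m | none => 8 : Nat) : Int)).getD ("", "")).1) ++ e
        ++ (((PySem.List.pyGet? pvTemplates ((match o with | some m => m | none => 8 : Nat) : Int)).getD ("", "")).2) := by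
  simp only [describe_sql_logic_alt, if_neg he, h]
  cases o <;> rfl

set_option maxHeartbeats 2000000 in
theorem describe_sql_logic_spec : Claim_equal_describe_sql_logic := by
  intro expr _
  unfold Spec_describe_sql_logic
  cases expr with
  | none => rfl
  | some e =>
    by_cases he : e = ""
    · simp [describe_sql_logic, describe_sql_logic_alt, he]
    · show describe_sql_logic (some e) = describe_sql_logic_alt (some e)
      by_cases h0 : (PySem.Str.isIn "CAST(" (PySem.Str.upper e) || PySem.Str.isIn "SAFE_CAST(" (PySem.Str.upper e)) = true
      ·   have hmem : (0:Nat) ∈ pvCats e (PySem.Str.upper e) := by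
            rw [mem_pvCats, mem_pvKw]
            simp_all
          have hlb : ∀ y ∈ pvCats e (PySem.Str.upper e), (0:Nat) ≤ y := by
            intro y hy
            rw [mem_pvCats, mem_pvKw] at hy
            rcases hy with (⟨rfl,hc⟩|⟨rfl,hc⟩|⟨rfl,hc⟩|⟨rfl,hc⟩|⟨rfl,hc⟩|⟨rfl,hc⟩|⟨rfl,hc⟩)|⟨rfl,hc⟩ <;>
              omega
          have hmin := pv_min?_id_eq _ 0 hmem hlb
          rw [alt_eq_of_min e he _ hmin]
          simp only [describe_sql_logic]
          simp only [if_neg he]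
          rw [if_pos h0]
          rfl
      · by_cases h1 : (["COALESCE(", "IFNULL(", "NULLIF("].any (fun kw => PySem.Str.isIn kw (PySem.Str.upper e))) = true
        ·   have hmem : (1:Nat) ∈ pvCats e (PySem.Str.upper e) := by
              rw [mem_pvCats, mem_pvKw]
              simp_all
            have hlb : ∀ y ∈ pvCats e (PySem.Str.upper e), (1:Nat) ≤ y := by
              intro y hy
              rw [mem_pvCats, mem_pvKw] at hy
              rcases hy with (⟨rfl,hc⟩|⟨rfl,hc⟩|⟨rfl,hc⟩|⟨rfl,hc⟩|⟨rfl,hc⟩|⟨rfl,hc⟩|⟨rfl,hc⟩)|⟨rfl,hc⟩ <;>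
                first | omega | (exfalso; simp_all)
            have hmin := pv_min?_id_eq _ 1 hmem hlb
            rw [alt_eq_of_min e he _ hmin]
            simp only [describe_sql_logic]
            simp only [if_neg he]
            rw [if_neg h0]
            rw [if_pos h1]
            rfl
        · by_cases h2 : (["ROUND(", "CEIL(", "FLOOR(", "TRUNC("].any (fun kw => PySem.Str.isIn kw (PySem.Str.upper e))) = true
          ·   have hmem : (2:Nat) ∈ pvCats e (PySem.Str.upper e) := by
                rw [mem_pvCats, mem_pvKw]
                simp_all
              have hlb : ∀ y ∈ pvCats e (PySem.Str.upper e), (2:Nat) ≤ y := by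
                intro y hy
                rw [mem_pvCats, mem_pvKw] at hy
                rcases hy with (⟨rfl,hc⟩|⟨rfl,hc⟩|⟨rfl,hc⟩|⟨rfl,hc⟩|⟨rfl,hc⟩|⟨rfl,hc⟩|⟨rfl,hc⟩)|⟨rfl,hc⟩ <;>
                  first | omega | (exfalso; simp_all)
              have hmin := pv_min?_id_eq _ 2 hmem hlb
              rw [alt_eq_of_min e he _ hmin]
              simp only [describe_sql_logic]
              simp only [if_neg he]
              rw [if_neg h0]
              rw [if_neg h1]
              rw [if_pos h2]
              rfl
          · by_cases h3 : ((["*", "/", "+", "-"].any (fun op => PySem.Str.isIn op e)) && (e.toList.any pvIsDigitChar)) = true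
            ·   have hmem : (3:Nat) ∈ pvCats e (PySem.Str.upper e) := by
                  rw [mem_pvCats, mem_pvKw]
                  simp_all
                have hlb : ∀ y ∈ pvCats e (PySem.Str.upper e), (3:Nat) ≤ y := by
                  intro y hy
                  rw [mem_pvCats, mem_pvKw] at hy
                  rcases hy with (⟨rfl,hc⟩|⟨rfl,hc⟩|⟨rfl,hc⟩|⟨rfl,hc⟩|⟨rfl,hc⟩|⟨rfl,hc⟩|⟨rfl,hc⟩)|⟨rfl,hc⟩ <;>
                    first | omega | (exfalso; simp_all)
                have hmin := pv_min?_id_eq _ 3 hmem hlb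
                rw [alt_eq_of_min e he _ hmin]
                simp only [describe_sql_logic]
                simp only [if_neg he]
                rw [if_neg h0]
                rw [if_neg h1]
                rw [if_neg h2]
                rw [if_pos h3]
                rfl
            · by_cases h4 : (["UPPER(", "LOWER(", "TRIM(", "CONCAT(", "SUBSTR("].any (fun kw => PySem.Str.isIn kw (PySem.Str.upper e))) = true
              ·   have hmem : (4:Nat) ∈ pvCats e (PySem.Str.upper e) := by
                    rw [mem_pvCats, mem_pvKw]
                    simp_all
                  have hlb : ∀ y ∈ pvCats e (PySem.Str.upper e), (4:Nat) ≤ y := by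
                    intro y hy
                    rw [mem_pvCats, mem_pvKw] at hy
                    rcases hy with (⟨rfl,hc⟩|⟨rfl,hc⟩|⟨rfl,hc⟩|⟨rfl,hc⟩|⟨rfl,hc⟩|⟨rfl,hc⟩|⟨rfl,hc⟩)|⟨rfl,hc⟩ <;>
                      first | omega | (exfalso; rw [← pv_arith_eq e] at hc; exact h3 hc) | (exfalso; simp_all)
                  have hmin := pv_min?_id_eq _ 4 hmem hlb
                  rw [alt_eq_of_min e he _ hmin]
                  simp only [describe_sql_logic]
                  simp only [if_neg he]
                  rw [if_neg h0]
                  rw [if_neg h1]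
                  rw [if_neg h2]
                  rw [if_neg h3]
                  rw [if_pos h4]
                  rfl
              · by_cases h5 : (PySem.Str.isIn "EXTRACT(" (PySem.Str.upper e)) = true
                ·   have hmem : (5:Nat) ∈ pvCats e (PySem.Str.upper e) := by
                      rw [mem_pvCats, mem_pvKw]
                      simp_all
                    have hlb : ∀ y ∈ pvCats e (PySem.Str.upper e), (5:Nat) ≤ y := by
                      intro y hy
                      rw [mem_pvCats, mem_pvKw] at hy
                      rcases hy with (⟨rfl,hc⟩|⟨rfl,hc⟩|⟨rfl,hc⟩|⟨rfl,hc⟩|⟨rfl,hc⟩|⟨rfl,hc⟩|⟨rfl,hc⟩)|⟨rfl,hc⟩ <;>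
                        first | omega | (exfalso; rw [← pv_arith_eq e] at hc; exact h3 hc) | (exfalso; simp_all)
                    have hmin := pv_min?_id_eq _ 5 hmem hlb
                    rw [alt_eq_of_min e he _ hmin]
                    simp only [describe_sql_logic]
                    simp only [if_neg he]
                    rw [if_neg h0]
                    rw [if_neg h1]
                    rw [if_neg h2]
                    rw [if_neg h3]
                    rw [if_neg h4]
                    rw [if_pos h5]
                    rfl
                · by_cases h6 : (PySem.Str.isIn "CASE" (PySem.Str.upper e) || PySem.Str.isIn "IF(" (PySem.Str.upper e)) = true
                  ·   have hmem : (6:Nat) ∈ pvCats e (PySem.Str.upper e) := by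
                        rw [mem_pvCats, mem_pvKw]
                        simp_all
                      have hlb : ∀ y ∈ pvCats e (PySem.Str.upper e), (6:Nat) ≤ y := by
                        intro y hy
                        rw [mem_pvCats, mem_pvKw] at hy
                        rcases hy with (⟨rfl,hc⟩|⟨rfl,hc⟩|⟨rfl,hc⟩|⟨rfl,hc⟩|⟨rfl,hc⟩|⟨rfl,hc⟩|⟨rfl,hc⟩)|⟨rfl,hc⟩ <;>
                          first | omega | (exfalso; rw [← pv_arith_eq e] at hc; exact h3 hc) | (exfalso; simp_all)
                      have hmin := pv_min?_id_eq _ 6 hmem hlb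
                      rw [alt_eq_of_min e he _ hmin]
                      simp only [describe_sql_logic]
                      simp only [if_neg he]
                      rw [if_neg h0]
                      rw [if_neg h1]
                      rw [if_neg h2]
                      rw [if_neg h3]
                      rw [if_neg h4]
                      rw [if_neg h5]
                      rw [if_pos h6]
                      rfl
                  · by_cases h7 : (PySem.Str.isIn "SAFE." (PySem.Str.upper e)) = true
                    ·   have hmem : (7:Nat) ∈ pvCats e (PySem.Str.upper e) := by
                          rw [mem_pvCats, mem_pvKw]
                          simp_all
                        have hlb : ∀ y ∈ pvCats e (PySem.Str.upper e), (7:Nat) ≤ y := by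
                          intro y hy
                          rw [mem_pvCats, mem_pvKw] at hy
                          rcases hy with (⟨rfl,hc⟩|⟨rfl,hc⟩|⟨rfl,hc⟩|⟨rfl,hc⟩|⟨rfl,hc⟩|⟨rfl,hc⟩|⟨rfl,hc⟩)|⟨rfl,hc⟩ <;>
                            first | omega | (exfalso; rw [← pv_arith_eq e] at hc; exact h3 hc) | (exfalso; simp_all)
                        have hmin := pv_min?_id_eq _ 7 hmem hlb
                        rw [alt_eq_of_min e he _ hmin]
                        simp only [describe_sql_logic]
                        simp only [if_neg he]
                        rw [if_neg h0]
                        rw [if_neg h1]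
                        rw [if_neg h2]
                        rw [if_neg h3]
                        rw [if_neg h4]
                        rw [if_neg h5]
                        rw [if_neg h6]
                        rw [if_pos h7]
                        rfl
                    ·   have hnone : ∀ y, y ∉ pvCats e (PySem.Str.upper e) := by
                          intro y hy
                          rw [mem_pvCats, mem_pvKw] at hy
                          rcases hy with (⟨rfl,hc⟩|⟨rfl,hc⟩|⟨rfl,hc⟩|⟨rfl,hc⟩|⟨rfl,hc⟩|⟨rfl,hc⟩|⟨rfl,hc⟩)|⟨rfl,hc⟩ <;> first | (exfalso; rw [← pv_arith_eq e] at hc; exact h3 hc) | simp_all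
                        have hmin := pv_min?_eq_none _ hnone
                        rw [alt_eq_of_min e he _ hmin]
                        simp only [describe_sql_logic]
                        simp only [if_neg he]
                        rw [if_neg h0]
                        rw [if_neg h1]
                        rw [if_neg h2]
                        rw [if_neg h3]
                        rw [if_neg h4]
                        rw [if_neg h5]
                        rw [if_neg h6]
                        rw [if_neg h7]
                        rfl
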